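-- pv_equiv track=rewrite | github.com/ZJCODE/CodeArchive | Gradulate/Time_Tool.py | Time_Bin
-- ===== SOURCE A (Python) =====
-- def Time_Bin(List,Unit):
--     #Unit Minute,Hour,Day,Week,Month
--     Minute_M = 1
--     Hour_M = 60
--     Day_M = Hour_M * 24
--     Week_M = Day_M * 7
--     Month_M = Day_M * 30
--     Dict_Time = dict(zip(['Minute','Hour','Day','Week','Month'],[Minute_M,Hour_M,Day_M,Week_M,Month_M]))
--     Bins = int(List[-1] / Dict_Time[Unit])
--     Count = [0] * Bins
--     j = 0
--     for i in range(Bins):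
--         while j < len(List) and List[j] <= Dict_Time[Unit] * (i+1):
--             j += 1
--             Count[i] += 1
--
--     return Count
-- ===== SOURCE B (Python) =====
-- def Time_Bin(List, Unit):
--     unit = {'Minute': 1, 'Hour': 60, 'Day': 1440, 'Week': 10080, 'Month': 43200}[Unit]
--     Bins = int(List[-1] / unit)
--     Count = [0] * Bins
--     cur = 0
--     for v in List:
--         k = (v - 1) // unit
--         if k < cur:
--             k = cur
--         if k >= Bins:
--             break
--         Count[k] += 1
--         cur = k
--     return Count
-- ===== Notes on version B (the rewrite author's own statement) =====
-- stated objective: alternative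
-- what changed: Replaces A's outer loop over bins with an inner merge pointer into the list by a single pass over the list elements that computes each element's bucket directly with integer floor division ((v-1)//unit), clamped up to the previous bucket and stopping at the first element whose bucket falls past the last bin.
import Mathlib
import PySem

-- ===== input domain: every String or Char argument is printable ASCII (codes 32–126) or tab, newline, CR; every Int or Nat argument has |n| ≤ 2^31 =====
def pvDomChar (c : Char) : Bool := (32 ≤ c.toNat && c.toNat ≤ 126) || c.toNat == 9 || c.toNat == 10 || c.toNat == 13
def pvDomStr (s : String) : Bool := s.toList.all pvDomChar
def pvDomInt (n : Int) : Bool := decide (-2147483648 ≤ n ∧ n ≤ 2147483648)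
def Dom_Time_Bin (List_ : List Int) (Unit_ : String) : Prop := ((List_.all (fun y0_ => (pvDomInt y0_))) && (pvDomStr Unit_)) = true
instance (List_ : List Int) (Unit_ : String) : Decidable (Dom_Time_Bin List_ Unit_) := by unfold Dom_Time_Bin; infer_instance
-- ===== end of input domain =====

-- B replaces A's bins-outer/pointer-inner merge sweep by a single per-element pass that
-- computes each value's bucket directly with integer floor division (objective: alternative).


-- ===== PORT A =====
-- inner loop: 'while j < len(List) and List[j] <= Dict_Time[Unit]*(i+1): j += 1; Count[i] += 1'
def TBA_inner (bnd : Int) (xs : List Int) (i : Nat) (j : Nat) (c : List Int) : Nat × List Int :=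
  if h : j < xs.length then
    if xs[j] ≤ bnd then TBA_inner bnd xs i (j + 1) (c.set i (c.getD i 0 + 1)) else (j, c)
  else (j, c)
  termination_by xs.length - j

def Time_Bin (List_ : List Int) (Unit_ : String) : List Int :=
  let dict := PySem.Dict.ofList [("Minute", (1 : Int)), ("Hour", 60), ("Day", 1440), ("Week", 10080), ("Month", 43200)]
  let u := (dict.get? Unit_).getD 1          -- KeyError on a missing key: excluded by Pre_
  let last := (PySem.List.pyGet? List_ (-1)).getD 0   -- IndexError on []: excluded by Pre_
  -- int(List_[-1] / u): exact trunc-division on Dom (|values| ≤ 2^31 < 2^53, so the float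
  -- quotient is within 2^-21 of the exact rational, whose distance to any integer it does
  -- not bridge, and int() truncates it exactly)
  let bins := Int.tdiv last u
  let count := List.replicate bins.toNat 0    -- [0]*Bins ([] for Bins ≤ 0)
  ((List.range bins.toNat).foldl
      (fun (st : Nat × List Int) (i : Nat) => TBA_inner (u * ((i : Int) + 1)) List_ i st.1 st.2)
      (0, count)).2

-- ===== PORT B =====
def TBB_go (u bins : Int) : List Int → Int → List Int → List Int
  | [], _, count => count
  | v :: rest, cur, count =>
      let k := PySem.Int.floordiv (v - 1) u
      let k := if k < cur then cur else k
      if bins ≤ k then count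
      else TBB_go u bins rest k (count.set k.toNat (count.getD k.toNat 0 + 1))

def Time_Bin_alt (List_ : List Int) (Unit_ : String) : List Int :=
  let dict := PySem.Dict.ofList [("Minute", (1 : Int)), ("Hour", 60), ("Day", 1440), ("Week", 10080), ("Month", 43200)]
  let u := (dict.get? Unit_).getD 1
  let last := (PySem.List.pyGet? List_ (-1)).getD 0
  let bins := Int.tdiv last u
  TBB_go u bins List_ 0 (List.replicate bins.toNat 0)

-- ===== PRECONDITION & SPEC =====
-- Pre_ excludes exactly the inputs where A raises: the empty list (IndexError on List[-1])
-- and a Unit that is not one of the five dictionary keys (KeyError).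
def Pre_Time_Bin (List_ : List Int) (Unit_ : String) : Prop :=
  List_ ≠ [] ∧ (Unit_ = "Minute" ∨ Unit_ = "Hour" ∨ Unit_ = "Day" ∨ Unit_ = "Week" ∨ Unit_ = "Month")
instance (List_ : List Int) (Unit_ : String) : Decidable (Pre_Time_Bin List_ Unit_) := by
  unfold Pre_Time_Bin; infer_instance

def pvWitness_Time_Bin : List Int × String := ([30, 90, 100, 500], "Hour")

def Spec_Time_Bin (List_ : List Int) (Unit_ : String) (out : List Int) : Prop := out = Time_Bin_alt List_ Unit_
instance (List_ : List Int) (Unit_ : String) (out : List Int) : Decidable (Spec_Time_Bin List_ Unit_ out) := by unfold Spec_Time_Bin; infer_instance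

-- ===== CLAIM (what is proved, stated in full; the proofs are below) =====
def Claim_equal_Time_Bin : Prop := ∀ (List_ : List Int) (Unit_ : String), Dom_Time_Bin List_ Unit_ → Pre_Time_Bin List_ Unit_ → Spec_Time_Bin List_ Unit_ (Time_Bin List_ Unit_)

-- ===== LEMMAS AND PROOFS =====

-- unfolding equations for the two loops
lemma TBA_inner_of_ge (bnd : Int) (xs : List Int) (i j : Nat) (c : List Int)
    (h : xs.length ≤ j) : TBA_inner bnd xs i j c = (j, c) := by
  rw [TBA_inner.eq_def]
  simp [Nat.not_lt.mpr h]

lemma TBA_inner_of_gt (bnd : Int) (xs : List Int) (i j : Nat) (c : List Int)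
    (h : j < xs.length) (hv : ¬ xs[j] ≤ bnd) : TBA_inner bnd xs i j c = (j, c) := by
  rw [TBA_inner.eq_def]
  simp [h, hv]

lemma TBA_inner_of_le (bnd : Int) (xs : List Int) (i j : Nat) (c : List Int)
    (h : j < xs.length) (hv : xs[j] ≤ bnd) :
    TBA_inner bnd xs i j c = TBA_inner bnd xs i (j + 1) (c.set i (c.getD i 0 + 1)) := by
  rw [TBA_inner.eq_def]
  simp [h, hv]

lemma TBB_cons (u bins v cur : Int) (rest count : List Int) :
    TBB_go u bins (v :: rest) cur count =
      (if bins ≤ (if PySem.Int.floordiv (v - 1) u < cur then cur else PySem.Int.floordiv (v - 1) u) then count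
       else TBB_go u bins rest
              (if PySem.Int.floordiv (v - 1) u < cur then cur else PySem.Int.floordiv (v - 1) u)
              (count.set (if PySem.Int.floordiv (v - 1) u < cur then cur else PySem.Int.floordiv (v - 1) u).toNat
                (count.getD (if PySem.Int.floordiv (v - 1) u < cur then cur else PySem.Int.floordiv (v - 1) u).toNat 0 + 1))) := rfl

-- the minimal eligible bin: (v-1)//u ≤ a  ↔  v ≤ u*(a+1)   (u > 0)
lemma TB_fdiv_le (u v a : Int) (hu : 0 < u) :
    PySem.Int.floordiv (v - 1) u ≤ a ↔ v ≤ u * (a + 1) := by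
  constructor
  · intro h
    by_contra hv
    rw [not_le] at hv
    have : a + 1 ≤ PySem.Int.floordiv (v - 1) u :=
      (PySem.Int.le_floordiv_iff_mul_le (a := v - 1) (b := u) (q := a + 1) hu).mpr (by nlinarith)
    omega
  · intro h
    by_contra hlt
    rw [not_le] at hlt
    have : (a + 1) * u ≤ v - 1 :=
      (PySem.Int.le_floordiv_iff_mul_le (a := v - 1) (b := u) (q := a + 1) hu).mp (by omega)
    nlinarith

-- the remaining outer iterations do nothing once the pointer is past the end
lemma TB_foldl_of_none (xs : List Int) (u : Int) (l : List Nat) (j : Nat) (c : List Int)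
    (h : xs.length ≤ j) :
    (l.foldl (fun (st : Nat × List Int) (i : Nat) => TBA_inner (u * ((i : Int) + 1)) xs i st.1 st.2)
      (j, c)) = (j, c) := by
  induction l with
  | nil => rfl
  | cons a l ih =>
      simp only [List.foldl_cons, TBA_inner_of_ge _ _ _ _ _ h]
      exact ih

-- B ignores the bucket floor when the head element's own bucket is already past it
lemma TBB_bump (u bins a : Int) (v : Int) (rest count : List Int)
    (hk : a + 1 ≤ PySem.Int.floordiv (v - 1) u) :
    TBB_go u bins (v :: rest) a count = TBB_go u bins (v :: rest) (a + 1) count := by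
  rw [TBB_cons, TBB_cons]
  rw [if_neg (show ¬ PySem.Int.floordiv (v - 1) u < a by omega),
      if_neg (show ¬ PySem.Int.floordiv (v - 1) u < a + 1 by omega)]

-- B returns the count unchanged once the floor has reached bins
lemma TBB_stop (u bins : Int) (xs : List Int) (a : Int) (c : List Int) (ha : bins ≤ a) :
    TBB_go u bins xs a c = c := by
  cases xs with
  | nil => rfl
  | cons v rest =>
      rw [TBB_cons]
      rw [if_pos]
      split <;> omega

-- MAIN: A's remaining outer sweep over bins [bins.toNat - n, bins.toNat) with pointer j
-- equals B's per-element pass over the remaining suffix with bucket floor bins.toNat - n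
lemma TB_main (u bins : Int) (hu : 0 < u) (xs : List Int) :
    ∀ n m j c, n ≤ bins.toNat → xs.length - j ≤ m →
      ((List.range' (bins.toNat - n) n).foldl
          (fun (st : Nat × List Int) (i : Nat) => TBA_inner (u * ((i : Int) + 1)) xs i st.1 st.2)
          (j, c)).2
        = TBB_go u bins (xs.drop j) ((bins.toNat - n : Nat) : Int) c := by
  intro n
  induction n with
  | zero =>
      intro m j c _ _
      simp only [Nat.sub_zero, List.range'_zero, List.foldl_nil]
      rw [TBB_stop u bins _ _ c (by exact_mod_cast Int.self_le_toNat bins)]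
  | succ n ihn =>
      intro m
      induction m with
      | zero =>
          intro j c hn hm
          rw [TB_foldl_of_none xs u _ j c (by omega)]
          rw [List.drop_eq_nil_of_le (by omega)]
          rfl
      | succ m ihm =>
          intro j c hn hm
          set a := bins.toNat - (n + 1) with ha
          have hbins0 : 0 < bins := by
            by_contra hb
            rw [not_lt] at hb
            have : bins.toNat = 0 := Int.toNat_of_nonpos hb
            omega
          have hbinsNat : (bins.toNat : Int) = bins := Int.toNat_of_nonneg (by omega)
          have haInt : (a : Int) + 1 ≤ bins := by
            have h1 : a + 1 ≤ bins.toNat := by omega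
            have := (Int.ofNat_le).mpr h1
            push_cast at this
            omega
          have hrangecons : List.range' a (n + 1) = a :: List.range' (a + 1) n := by
            rw [List.range'_succ]
          by_cases hj : j < xs.length
          · have hdrop : xs.drop j = xs[j] :: xs.drop (j + 1) := List.drop_eq_getElem_cons hj
            by_cases hv : xs[j] ≤ u * ((a : Int) + 1)
            · -- element consumed at bin a by both programs
              have hk : PySem.Int.floordiv (xs[j] - 1) u ≤ (a : Int) :=
                (TB_fdiv_le u xs[j] a hu).mpr hv
              have hkval : (if PySem.Int.floordiv (xs[j] - 1) u < (a : Int) then (a : Int)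
                  else PySem.Int.floordiv (xs[j] - 1) u) = (a : Int) := by
                split <;> omega
              have hfold :
                  ((List.range' a (n + 1)).foldl
                      (fun (st : Nat × List Int) (i : Nat) => TBA_inner (u * ((i : Int) + 1)) xs i st.1 st.2)
                      (j, c))
                    = ((List.range' a (n + 1)).foldl
                        (fun (st : Nat × List Int) (i : Nat) => TBA_inner (u * ((i : Int) + 1)) xs i st.1 st.2)
                        (j + 1, c.set a (c.getD a 0 + 1))) := by
                rw [hrangecons, List.foldl_cons, List.foldl_cons]
                rw [show TBA_inner (u * ((a : Int) + 1)) xs a j c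
                      = TBA_inner (u * ((a : Int) + 1)) xs a (j + 1) (c.set a (c.getD a 0 + 1)) from
                    TBA_inner_of_le _ _ _ _ _ hj hv]
              have hB : TBB_go u bins (xs.drop j) ((a : Nat) : Int) c
                  = TBB_go u bins (xs.drop (j + 1)) ((a : Nat) : Int) (c.set a (c.getD a 0 + 1)) := by
                rw [hdrop, TBB_cons, hkval,
                    if_neg (show ¬ bins ≤ (a : Int) by omega), Int.toNat_natCast]
              rw [hfold, hB]
              exact ihm (j + 1) (c.set a (c.getD a 0 + 1)) hn (by omega)
            · -- element rejected at bin a: A moves to the next bin, B bumps its floor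
              have hk : (a : Int) + 1 ≤ PySem.Int.floordiv (xs[j] - 1) u := by
                by_contra hc
                rw [not_le] at hc
                exact hv ((TB_fdiv_le u xs[j] a hu).mp (by omega))
              have ha1 : a + 1 = bins.toNat - n := by omega
              have hstepA : TBA_inner (u * ((a : Int) + 1)) xs a j c = (j, c) :=
                TBA_inner_of_gt _ _ _ _ _ hj hv
              rw [hrangecons, List.foldl_cons, hstepA, ha1]
              rw [ihn xs.length j c (by omega) (by omega)]
              rw [hdrop, ← ha1]
              rw [show ((a + 1 : Nat) : Int) = (a : Int) + 1 by push_cast; ring]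
              exact (TBB_bump u bins (a : Int) xs[j] (xs.drop (j + 1)) c hk).symm
          · rw [TB_foldl_of_none xs u _ j c (by omega)]
            rw [List.drop_eq_nil_of_le (by omega)]
            rfl

-- u is positive for every admitted Unit
lemma TB_u_pos (Unit_ : String)
    (h : Unit_ = "Minute" ∨ Unit_ = "Hour" ∨ Unit_ = "Day" ∨ Unit_ = "Week" ∨ Unit_ = "Month") :
    0 < ((PySem.Dict.ofList [("Minute", (1 : Int)), ("Hour", 60), ("Day", 1440), ("Week", 10080), ("Month", 43200)]).get? Unit_).getD 1 := by
  rcases h with h | h | h | h | h <;> subst h <;> decide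

-- ===== VERDICT (by name: the statement is the Claim_ definition above) =====
theorem Time_Bin_spec : Claim_equal_Time_Bin := by
  intro List_ Unit_ _ hpre
  unfold Spec_Time_Bin Time_Bin Time_Bin_alt
  have hu := TB_u_pos Unit_ hpre.2
  dsimp only
  rw [List.range_eq_range']
  set u := ((PySem.Dict.ofList [("Minute", (1 : Int)), ("Hour", 60), ("Day", 1440), ("Week", 10080), ("Month", 43200)]).get? Unit_).getD 1 with hU
  set bins := Int.tdiv ((PySem.List.pyGet? List_ (-1)).getD 0) u with hB
  have hmain := TB_main u bins hu List_ bins.toNat List_.length 0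
      (List.replicate bins.toNat 0) le_rfl (by omega)
  simpa using hmain
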